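-- pv_equiv track=rewrite | github.com/diofant/diofant | diofant/parsing/sympy_parser.py | lambda_notation
-- ===== SOURCE A (Python) =====
-- from tokenize import (ENDMARKER, NAME, NEWLINE, NUMBER, OP, STRING, TokenError,
--                       tokenize, untokenize)
--
-- def lambda_notation(tokens, local_dict, global_dict):
--     """Substitutes "lambda" with its Sympy equivalent Lambda().
--     However, the conversion doesn't take place if only "lambda"
--     is passed because that is a syntax error.
--
--     """
--     result = []
--     flag = False
--     if tokens[0][1] == 'utf-8' and tokens[1] == (NAME, 'lambda'):
--         tokens = tokens[1:]
--     toknum, tokval = tokens[0]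
--     tokLen = len(tokens)
--     if toknum == NAME and tokval == 'lambda':
--         if tokLen == 2 or (tokLen == 3 and tokens[1][0] == NEWLINE):
--             result.extend(tokens)
--         elif tokLen > 2:
--             result.extend([
--                 (NAME, 'Lambda'),
--                 (OP, '('),
--                 (OP, '('),
--                 (OP, ')'),
--                 (OP, ')'),
--             ])
--             for tokNum, tokVal in tokens[1:]:
--                 if tokNum == OP and tokVal == ':':
--                     tokVal = ','
--                     flag = True
--                 if not flag and tokNum == OP and tokVal in ['*', '**']:
--                     raise NotImplementedError('Starred arguments in lambda not supported')
--                 if flag: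
--                     result.insert(-1, (tokNum, tokVal))
--                 else:
--                     result.insert(-2, (tokNum, tokVal))
--         else:
--             raise NotImplementedError
--     else:
--         result.extend(tokens)
--
--     return result
-- ===== SOURCE B (Python) =====
-- # token-type constants of Python's tokenize module
-- NAME = 1
-- NEWLINE = 4
-- OP = 54
--
--
-- def lambda_notation(tokens, local_dict, global_dict):
--     """Substitutes "lambda" with its Sympy equivalent Lambda().
--
--     Splits the token stream at the first ':' and builds the result in one
--     shot instead of a flagged insert(-1)/insert(-2) pass.
--     """
--     if tokens[0][1] == 'utf-8' and tokens[1] == (NAME, 'lambda'):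
--         tokens = tokens[1:]
--     toknum, tokval = tokens[0]
--     n = len(tokens)
--     if not (toknum == NAME and tokval == 'lambda'):
--         return list(tokens)
--     if n == 2 or (n == 3 and tokens[1][0] == NEWLINE):
--         return list(tokens)
--     if n <= 1:
--         raise NotImplementedError
--     rest = tokens[1:]
--     ci = next((i for i, (tn, tv) in enumerate(rest) if tn == OP and tv == ':'),
--               None)
--     args = rest if ci is None else rest[:ci]
--     if any(tn == OP and tv in ('*', '**') for tn, tv in args):
--         raise NotImplementedError('Starred arguments in lambda not supported')
--     head = [(NAME, 'Lambda'), (OP, '('), (OP, '(')]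
--     if ci is None:
--         return head + args + [(OP, ')'), (OP, ')')]
--     body = [(tn, ',') if tn == OP and tv == ':' else (tn, tv)
--             for tn, tv in rest[ci + 1:]]
--     return head + args + [(OP, ')'), (OP, ',')] + body + [(OP, ')')]
-- ===== Notes on version B (the rewrite author's own statement) =====
-- stated objective: simpler
-- what changed: Replaces A's single flagged pass with insert(-1)/insert(-2) into a growing result by locating the first ':' token, slicing tokens into args and body, checking only args for starred tokens, and concatenating the result in one shot.
-- outside the precondition, e.g. on lambda_notation([], {}, {}): A raises IndexError, B raises IndexError; on lambda_notation([(1, 'lambda')], {}, {}): A raises NotImplementedError, B raises NotImplementedError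
import Mathlib
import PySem

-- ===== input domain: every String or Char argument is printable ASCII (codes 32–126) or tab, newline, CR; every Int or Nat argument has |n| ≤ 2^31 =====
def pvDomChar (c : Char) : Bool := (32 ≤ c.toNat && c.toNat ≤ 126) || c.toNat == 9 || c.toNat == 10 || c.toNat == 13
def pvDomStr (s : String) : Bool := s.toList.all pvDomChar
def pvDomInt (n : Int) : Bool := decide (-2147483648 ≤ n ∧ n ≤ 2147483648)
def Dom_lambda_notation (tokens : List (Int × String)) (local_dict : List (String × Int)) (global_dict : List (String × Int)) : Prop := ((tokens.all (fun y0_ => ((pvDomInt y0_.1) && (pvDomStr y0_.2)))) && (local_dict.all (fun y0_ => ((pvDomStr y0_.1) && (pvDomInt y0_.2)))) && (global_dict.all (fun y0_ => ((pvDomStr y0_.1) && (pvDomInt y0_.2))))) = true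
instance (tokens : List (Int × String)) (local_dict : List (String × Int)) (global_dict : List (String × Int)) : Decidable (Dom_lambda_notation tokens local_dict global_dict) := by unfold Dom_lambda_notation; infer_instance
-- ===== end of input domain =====

-- B replaces A's flagged insert(-1)/insert(-2) pass by splitting the tokens at the
-- first ':' and concatenating the result in one shot (objective: simpler).
-- Token-type constants (from Python's tokenize): NAME = 1, NEWLINE = 4, OP = 54.

-- ===== PORT A =====
-- one iteration of A's flagged loop over tokens[1:] (A's NotImplementedError on a
-- pre-colon starred token is excluded by Pre_, so the step does not model the raise)
def pvStepA (st : List (Int × String) × Bool) (tok : Int × String) : List (Int × String) × Bool :=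
  let p : String × Bool := if tok.1 = 54 ∧ tok.2 = ":" then (",", true) else (tok.2, st.2)
  if p.2 then (PySem.List.insert st.1 (-1) (tok.1, p.1), true)
  else (PySem.List.insert st.1 (-2) (tok.1, p.1), false)

-- A after the utf-8/lambda prefix strip
def pvCoreA (tokens : List (Int × String)) : List (Int × String) :=
  let hd := tokens.headD (0, "")
  let tokLen := tokens.length
  if hd.1 = 1 ∧ hd.2 = "lambda" then
    if tokLen = 2 ∨ (tokLen = 3 ∧ (tokens.getD 1 (0, "")).1 = 4) then tokens
    else if 2 < tokLen then
      ((tokens.drop 1).foldl pvStepA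
        ([(1, "Lambda"), (54, "("), (54, "("), (54, ")"), (54, ")")], false)).1
    else []  -- Python: raise NotImplementedError (tokLen ≤ 1); excluded by Pre_
  else tokens

def lambda_notation (tokens : List (Int × String)) (local_dict : List (String × Int)) (global_dict : List (String × Int)) : List (Int × String) :=
  let tokens :=
    if (tokens.headD (0, "")).2 = "utf-8" ∧ tokens.getD 1 (0, "") = ((1 : Int), "lambda")
    then tokens.drop 1 else tokens
  pvCoreA tokens

-- ===== PORT B =====
def pvIsColon (t : Int × String) : Bool := t.1 == 54 && t.2 == ":"
def pvIsStar (t : Int × String) : Bool := t.1 == 54 && (t.2 == "*" || t.2 == "**")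
def pvConv (t : Int × String) : Int × String := if t.1 = 54 ∧ t.2 = ":" then (t.1, ",") else t

-- B after the (identical) prefix strip
def pvCoreB (tokens : List (Int × String)) : List (Int × String) :=
  let hd := tokens.headD (0, "")
  let n := tokens.length
  if ¬(hd.1 = 1 ∧ hd.2 = "lambda") then tokens
  else if n = 2 ∨ (n = 3 ∧ (tokens.getD 1 (0, "")).1 = 4) then tokens
  else if n ≤ 1 then []  -- Python: raise NotImplementedError; excluded by Pre_
  else
    let rest := tokens.drop 1
    let ci := rest.findIdx? pvIsColon
    let args := match ci with | none => rest | some i => rest.take i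
    if args.any pvIsStar then []  -- Python: raise NotImplementedError; excluded by Pre_
    else
      let head : List (Int × String) := [(1, "Lambda"), (54, "("), (54, "(")]
      match ci with
      | none => head ++ args ++ [(54, ")"), (54, ")")]
      | some i => head ++ args ++ [(54, ")"), (54, ",")] ++ (rest.drop (i + 1)).map pvConv ++ [(54, ")")]

def lambda_notation_alt (tokens : List (Int × String)) (local_dict : List (String × Int)) (global_dict : List (String × Int)) : List (Int × String) :=
  let tokens :=
    if (tokens.headD (0, "")).2 = "utf-8" ∧ tokens.getD 1 (0, "") = ((1 : Int), "lambda")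
    then tokens.drop 1 else tokens
  pvCoreB tokens

-- ===== PRECONDITION & SPEC =====
-- Pre_ excludes exactly the inputs where A raises: the empty list and a length-1
-- 'utf-8' first token (IndexError), a bare post-strip 'lambda' of length 1
-- (NotImplementedError), and a starred argument before the first ':' in the loop
-- case (NotImplementedError).  B raises on the very same inputs.
def Pre_lambda_notation (tokens : List (Int × String)) (local_dict : List (String × Int)) (global_dict : List (String × Int)) : Prop :=
  tokens ≠ [] ∧
  ((tokens.headD (0, "")).2 = "utf-8" → 2 ≤ tokens.length) ∧
  (let ts :=
    if (tokens.headD (0, "")).2 = "utf-8" ∧ tokens.getD 1 (0, "") = ((1 : Int), "lambda")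
    then tokens.drop 1 else tokens
   ((ts.headD (0, "")).1 = 1 ∧ (ts.headD (0, "")).2 = "lambda") →
     ts.length ≠ 1 ∧
     (¬(ts.length = 2 ∨ (ts.length = 3 ∧ (ts.getD 1 (0, "")).1 = 4)) →
       ∀ t ∈ (ts.drop 1).takeWhile (fun t => !(t.1 == 54 && t.2 == ":")),
         ¬(t.1 = 54 ∧ (t.2 = "*" ∨ t.2 = "**"))))

instance (tokens : List (Int × String)) (local_dict : List (String × Int)) (global_dict : List (String × Int)) : Decidable (Pre_lambda_notation tokens local_dict global_dict) := by unfold Pre_lambda_notation; infer_instance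

def pvWitness_lambda_notation : (List (Int × String)) × (List (String × Int)) × (List (String × Int)) :=
  ([(1, "lambda"), (1, "x"), (54, ":"), (1, "x"), (4, "\n"), (0, "")], [], [])

def Spec_lambda_notation (tokens : List (Int × String)) (local_dict : List (String × Int)) (global_dict : List (String × Int)) (out : List (Int × String)) : Prop := out = lambda_notation_alt tokens local_dict global_dict
instance (tokens : List (Int × String)) (local_dict : List (String × Int)) (global_dict : List (String × Int)) (out : List (Int × String)) : Decidable (Spec_lambda_notation tokens local_dict global_dict out) := by unfold Spec_lambda_notation; infer_instance

-- ===== CLAIM (what is proved, stated in full; the proofs are below) =====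
def Claim_equal_lambda_notation : Prop := ∀ (tokens : List (Int × String)) (local_dict : List (String × Int)) (global_dict : List (String × Int)), Dom_lambda_notation tokens local_dict global_dict → Pre_lambda_notation tokens local_dict global_dict → Spec_lambda_notation tokens local_dict global_dict (lambda_notation tokens local_dict global_dict)

-- ===== LEMMAS AND PROOFS =====

theorem pvInsN1 (ys : List (Int × String)) (b x : Int × String) :
    PySem.List.insert (ys ++ [b]) (-1) x = ys ++ [x, b] := by
  simp [PySem.List.insert, PySem.List.sliceIndices]

theorem pvInsN2 (ys : List (Int × String)) (b c x : Int × String) :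
    PySem.List.insert (ys ++ [b, c]) (-2) x = ys ++ [x, b, c] := by
  simp [PySem.List.insert, PySem.List.sliceIndices]

-- once the flag is set, each token (colon turned into a comma) goes right before the final ')'
theorem pvLoopFlag (l : List (Int × String)) : ∀ ys : List (Int × String),
    l.foldl pvStepA (ys ++ [((54 : Int), ")")], true) = (ys ++ l.map pvConv ++ [((54 : Int), ")")], true) := by
  induction l with
  | nil => intro ys; simp
  | cons t l ih =>
    intro ys
    have hstep : pvStepA (ys ++ [((54 : Int), ")")], true) t
        = ((ys ++ [pvConv t]) ++ [((54 : Int), ")")], true) := by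
      by_cases h : t.1 = 54 ∧ t.2 = ":"
      · simp [pvStepA, pvConv, h, pvInsN1]
      · simp [pvStepA, pvConv, h, pvInsN1]
    simp only [List.foldl_cons, hstep, ih]
    simp

-- characterisation of A's whole loop, started with 'as' arguments already collected
theorem pvLoopNoFlag (l : List (Int × String)) : ∀ as : List (Int × String),
    l.foldl pvStepA
        ([((1 : Int), "Lambda"), (54, "("), (54, "(")] ++ as ++ [(54, ")"), (54, ")")], false)
      = (match l.findIdx? pvIsColon with
         | none => [((1 : Int), "Lambda"), (54, "("), (54, "(")] ++ as ++ l ++ [(54, ")"), (54, ")")]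
         | some i => [((1 : Int), "Lambda"), (54, "("), (54, "(")] ++ as ++ l.take i
             ++ [(54, ")"), (54, ",")] ++ (l.drop (i + 1)).map pvConv ++ [(54, ")")],
         (l.findIdx? pvIsColon).isSome) := by
  induction l with
  | nil => intro as; simp
  | cons t l ih =>
    intro as
    by_cases h : t.1 = 54 ∧ t.2 = ":"
    · have hp : pvIsColon t = true := by simp [pvIsColon, h.1, h.2]
      have hstep : pvStepA
          ([((1 : Int), "Lambda"), (54, "("), (54, "(")] ++ as ++ [(54, ")"), (54, ")")], false) t
          = (([((1 : Int), "Lambda"), (54, "("), (54, "(")] ++ as ++ [(54, ")"), (54, ",")]) ++ [((54 : Int), ")")], true) := by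
        have := pvInsN1 ([((1 : Int), "Lambda"), (54, "("), (54, "(")] ++ as ++ [(54, ")")]) (54, ")") (t.1, ",")
        rw [h.1] at this
        simp only [pvStepA, h, and_self, ite_true]
        simp only [List.append_assoc, List.cons_append, List.nil_append] at this ⊢
        simpa using this
      simp only [List.foldl_cons, hstep, pvLoopFlag, List.findIdx?_cons, hp]
      simp
    · have hp : pvIsColon t = false := by
        simp only [pvIsColon]
        by_cases h1 : t.1 = 54
        · have h2 : ¬ t.2 = ":" := fun h2 => h ⟨h1, h2⟩
          simp [h1, h2]
        · simp [h1]
      have hstep : pvStepA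
          ([((1 : Int), "Lambda"), (54, "("), (54, "(")] ++ as ++ [(54, ")"), (54, ")")], false) t
          = ([((1 : Int), "Lambda"), (54, "("), (54, "(")] ++ (as ++ [t]) ++ [(54, ")"), (54, ")")], false) := by
        have := pvInsN2 ([((1 : Int), "Lambda"), (54, "("), (54, "(")] ++ as) ((54 : Int), ")") ((54 : Int), ")") t
        simp only [pvStepA, h, ite_false]
        simp only [List.append_assoc, List.cons_append, List.nil_append] at this ⊢
        simpa using this
      simp only [List.foldl_cons, hstep, ih, List.findIdx?_cons, hp]
      cases hfi : l.findIdx? pvIsColon with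
      | none => simp
      | some i => simp

-- the pre-colon segment is exactly the not-colon takeWhile
theorem pvTakeWhileFind (l : List (Int × String)) :
    l.takeWhile (fun t => !(t.1 == 54 && t.2 == ":"))
      = (match l.findIdx? pvIsColon with | none => l | some i => l.take i) := by
  induction l with
  | nil => simp
  | cons t l ih =>
    by_cases h : pvIsColon t = true
    · simp only [List.findIdx?_cons, h, ite_true]
      simp only [pvIsColon, Bool.and_eq_true, beq_iff_eq] at h
      simp [List.takeWhile_cons, h.1, h.2]
    · have h' : pvIsColon t = false := by simpa using h
      simp only [List.findIdx?_cons, h', Bool.false_eq_true, ite_false]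
      simp only [pvIsColon] at h'
      simp only [List.takeWhile_cons, h', Bool.not_false, ite_true, ih]
      cases hfi : l.findIdx? pvIsColon with
      | none => simp
      | some i => simp

theorem pvStarFalse (t : Int × String) (h : ¬(t.1 = 54 ∧ (t.2 = "*" ∨ t.2 = "**"))) :
    pvIsStar t = false := by
  simp only [pvIsStar]
  by_cases ha : t.1 = 54
  · have hb : ¬(t.2 = "*" ∨ t.2 = "**") := fun hb => h ⟨ha, hb⟩
    push_neg at hb
    simp [ha, hb.1, hb.2]
  · simp [ha]

-- A and B agree after the shared prefix strip, on non-raising inputs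
theorem pvCore_eq (ts : List (Int × String)) (hne : ts ≠ [])
    (h : ((ts.headD (0, "")).1 = 1 ∧ (ts.headD (0, "")).2 = "lambda") →
      ts.length ≠ 1 ∧
      (¬(ts.length = 2 ∨ (ts.length = 3 ∧ (ts.getD 1 (0, "")).1 = 4)) →
        ∀ t ∈ (ts.drop 1).takeWhile (fun t => !(t.1 == 54 && t.2 == ":")),
          ¬(t.1 = 54 ∧ (t.2 = "*" ∨ t.2 = "**")))) :
    pvCoreA ts = pvCoreB ts := by
  simp only [pvCoreA, pvCoreB]
  by_cases hlam : (ts.headD (0, "")).1 = 1 ∧ (ts.headD (0, "")).2 = "lambda"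
  · obtain ⟨h1, hstars⟩ := h hlam
    by_cases h23 : ts.length = 2 ∨ (ts.length = 3 ∧ (ts.getD 1 (0, "")).1 = 4)
    · rw [if_pos hlam, if_pos h23, if_neg (not_not_intro hlam), if_pos h23]
    · have hlen : 2 < ts.length := by
        have h0 : ts.length ≠ 0 := by simpa using hne
        have h2 : ts.length ≠ 2 := fun hc => h23 (Or.inl hc)
        omega
      have hn1 : ¬ ts.length ≤ 1 := by omega
      have hstars' := hstars h23
      rw [pvTakeWhileFind] at hstars'
      rw [if_pos hlam, if_neg h23, if_pos hlen, if_neg (not_not_intro hlam), if_neg h23,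
        if_neg hn1]
      have hl := pvLoopNoFlag (ts.drop 1) []
      simp only [List.nil_append, List.append_nil, List.append_assoc, List.cons_append] at hl
      rw [hl]
      cases hfi : (ts.drop 1).findIdx? pvIsColon with
      | none =>
        rw [hfi] at hstars'
        simp
        intro x y hx
        exact pvStarFalse (x, y) (hstars' (x, y) (by simpa using hx))
      | some i =>
        rw [hfi] at hstars'
        simp
        intro x y hx
        exact pvStarFalse (x, y) (hstars' (x, y) (by simpa using hx))
  · rw [if_neg hlam, if_pos hlam]

-- ===== VERDICT (by name: the statement is the Claim_ definition above) =====
theorem lambda_notation_spec : Claim_equal_lambda_notation := by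
  intro tokens local_dict global_dict _hdom hpre
  obtain ⟨hne, _hutf, hrest⟩ := hpre
  unfold Spec_lambda_notation lambda_notation lambda_notation_alt
  by_cases hc : (tokens.headD (0, "")).2 = "utf-8" ∧ tokens.getD 1 (0, "") = ((1 : Int), "lambda")
  · have hlen2 : 2 ≤ tokens.length := by
      by_contra hl
      have h1 : tokens[1]? = none := by
        rw [List.getElem?_eq_none_iff]; omega
      have := hc.2
      rw [List.getD, h1] at this
      simp at this
    have hne' : tokens.drop 1 ≠ [] := by
      have : (tokens.drop 1).length = tokens.length - 1 := by simp
      intro hcon; rw [hcon] at this; simp at this; omega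
    simp only [hc, and_self, ite_true] at hrest ⊢
    exact pvCore_eq _ hne' hrest
  · simp only [if_neg hc] at hrest ⊢
    exact pvCore_eq _ hne hrest
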